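-- pv_equiv track=rewrite | github.com/iAmSomething/2026- | scripts/run_issue312_commoncode_resync.py | _allocate_generated_code
-- ===== SOURCE A (Python) =====
-- def _allocate_generated_code(prefix: str, used_suffixes: set[int]) -> str:
--     for suffix in range(900, 1000):
--         if suffix not in used_suffixes:
--             used_suffixes.add(suffix)
--             return f"{prefix}-{suffix:03d}"
--     for suffix in range(1, 900):
--         if suffix not in used_suffixes:
--             used_suffixes.add(suffix)
--             return f"{prefix}-{suffix:03d}"
--     raise RuntimeError(f"no available generated suffix for prefix={prefix}")
-- ===== SOURCE B (Python) =====
-- def _allocate_generated_code(prefix: str, used_suffixes: set[int]) -> str: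
--     avail = set(range(900, 1000)) - used_suffixes
--     if not avail:
--         avail = set(range(1, 900)) - used_suffixes
--     if not avail:
--         raise RuntimeError(f"no available generated suffix for prefix={prefix}")
--     suffix = min(avail)
--     used_suffixes.add(suffix)
--     return f"{prefix}-{suffix:03d}"
-- ===== Notes on version B (the rewrite author's own statement) =====
-- stated objective: simpler
-- what changed: Replaces the two early-exit linear scans with set-difference of the candidate ranges followed by min, keeping the 900-999-first priority and the same RuntimeError when every suffix 1-999 is used.
import Mathlib
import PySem

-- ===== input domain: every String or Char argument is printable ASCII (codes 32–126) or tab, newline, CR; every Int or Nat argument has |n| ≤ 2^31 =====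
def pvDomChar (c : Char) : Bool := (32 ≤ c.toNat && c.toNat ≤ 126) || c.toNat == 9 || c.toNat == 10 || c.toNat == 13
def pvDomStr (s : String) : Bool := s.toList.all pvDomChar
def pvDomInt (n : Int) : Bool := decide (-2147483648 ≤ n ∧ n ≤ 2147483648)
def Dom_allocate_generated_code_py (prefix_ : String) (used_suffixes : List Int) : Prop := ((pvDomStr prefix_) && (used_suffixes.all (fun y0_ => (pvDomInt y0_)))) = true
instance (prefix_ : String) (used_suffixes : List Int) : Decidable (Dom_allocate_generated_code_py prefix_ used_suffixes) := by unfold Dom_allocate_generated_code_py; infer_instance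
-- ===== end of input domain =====

-- B replaces A's two early-exit linear scans with set-difference of each candidate range followed by min (same
-- 900-999-first priority); objective: simpler. Both Pythons also add the chosen suffix to used_suffixes in place;
-- the equivalence proved here is about the RETURN value only (the mutation is identical in A and B anyway).

-- shared formatting primitive for the f-string f"{prefix}-{suffix:03d}"; exact for 0 ≤ n
-- (the only values reaching it here are 1..999)
def pyFmt03 (prefix_ : String) (n : Int) : String :=
  let t := PySem.Int.toChars n
  String.ofList (prefix_.toList ++ '-' :: (List.replicate (3 - t.length) '0' ++ t))

-- ===== PORT A =====
-- first 'for' loop: first suffix in range(900,1000) not in used_suffixes; second loop likewise on range(1,900);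
-- the final 'raise RuntimeError' is excluded by Pre_ (the port returns "" there).
def allocate_generated_code_py (prefix_ : String) (used_suffixes : List Int) : String :=
  match (PySem.List.pyRange 900 1000 1).find? (fun s => !(used_suffixes.contains s)) with
  | some s => pyFmt03 prefix_ s
  | none =>
    match (PySem.List.pyRange 1 900 1).find? (fun s => !(used_suffixes.contains s)) with
    | some s => pyFmt03 prefix_ s
    | none => ""  -- RuntimeError in Python; outside Pre_

-- ===== PORT B =====
-- set(range(900,1000)) - used_suffixes; if empty, set(range(1,900)) - used_suffixes; then min(avail).
def allocate_generated_code_py_alt (prefix_ : String) (used_suffixes : List Int) : String :=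
  let high := PySem.Set.diff (PySem.Set.ofList (PySem.List.pyRange 900 1000 1)) used_suffixes
  let avail := if high.isEmpty then
      PySem.Set.diff (PySem.Set.ofList (PySem.List.pyRange 1 900 1)) used_suffixes
    else high
  match PySem.List.min? avail (fun x => x) with
  | some s => pyFmt03 prefix_ s
  | none => ""  -- RuntimeError in Python; outside Pre_

-- ===== PRECONDITION & SPEC =====
-- Pre_ excludes exactly the inputs where every suffix 1..999 is already used: there both Pythons raise RuntimeError.
-- i.e. some suffix in 1..999 is still free, stated as: fewer than 999 DISTINCT in-range used suffixes.
def Pre_allocate_generated_code_py (prefix_ : String) (used_suffixes : List Int) : Prop :=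
  (PySem.Set.ofList (used_suffixes.filter (fun s => 1 ≤ s && s < 1000))).length < 999
instance (prefix_ : String) (used_suffixes : List Int) : Decidable (Pre_allocate_generated_code_py prefix_ used_suffixes) := by unfold Pre_allocate_generated_code_py; infer_instance

def pvWitness_allocate_generated_code_py : String × List Int := ("COM", [901, 900])

def Spec_allocate_generated_code_py (prefix_ : String) (used_suffixes : List Int) (out : String) : Prop := out = allocate_generated_code_py_alt prefix_ used_suffixes
instance (prefix_ : String) (used_suffixes : List Int) (out : String) : Decidable (Spec_allocate_generated_code_py prefix_ used_suffixes out) := by unfold Spec_allocate_generated_code_py; infer_instance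

-- ===== CLAIM (what is proved, stated in full; the proofs are below) =====
def Claim_equal_allocate_generated_code_py : Prop := ∀ (prefix_ : String) (used_suffixes : List Int), Dom_allocate_generated_code_py prefix_ used_suffixes → Pre_allocate_generated_code_py prefix_ used_suffixes → Spec_allocate_generated_code_py prefix_ used_suffixes (allocate_generated_code_py prefix_ used_suffixes)

-- ===== LEMMAS AND PROOFS =====

theorem foldl_min_self (t : List Int) (x : Int) (h : ∀ y ∈ t, x ≤ y) : t.foldl min x = x := by
  induction t generalizing x with
  | nil => rfl
  | cons a t ih =>
    simp only [List.foldl_cons]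
    rw [min_eq_left (h a (by simp))]
    exact ih x fun y hy => h y (by simp [hy])

-- min over a strictly increasing list is its head
theorem min?_id_eq_head? (l : List Int) (h : l.Pairwise (· < ·)) :
    PySem.List.min? l (fun x => x) = l.head? := by
  cases l with
  | nil => rfl
  | cons x t =>
    rw [PySem.List.min?_id_cons]
    simp only [List.head?_cons, Option.some.injEq]
    exact foldl_min_self t x fun y hy => le_of_lt ((List.pairwise_cons.mp h).1 y hy)

-- ===== VERDICT (by name: the statement is the Claim_ definition above) =====
theorem allocate_generated_code_py_spec : Claim_equal_allocate_generated_code_py := by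
  intro prefix_ used _ _
  unfold Spec_allocate_generated_code_py allocate_generated_code_py allocate_generated_code_py_alt
  have heq1 : PySem.Set.diff (PySem.Set.ofList (PySem.List.pyRange 900 1000 1)) used
      = (PySem.List.pyRange 900 1000 1).filter (fun s => !(used.contains s)) := by
    rw [PySem.Set.ofList_eq_self_of_nodup _ (PySem.List.nodup_pyRange_one 900 1000)]; rfl
  have heq2 : PySem.Set.diff (PySem.Set.ofList (PySem.List.pyRange 1 900 1)) used
      = (PySem.List.pyRange 1 900 1).filter (fun s => !(used.contains s)) := by
    rw [PySem.Set.ofList_eq_self_of_nodup _ (PySem.List.nodup_pyRange_one 1 900)]; rfl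
  rw [heq1, heq2]
  cases hf : (PySem.List.pyRange 900 1000 1).filter (fun s => !(used.contains s)) with
  | cons x t =>
    have : ((PySem.List.pyRange 900 1000 1).filter (fun s => !(used.contains s))).head? = some x := by
      rw [hf]; rfl
    rw [List.head?_filter] at this
    rw [this]
    simp only [List.isEmpty_cons, if_false, Bool.false_eq_true]
    have hp : (x :: t).Pairwise (· < ·) :=
      hf ▸ (PySem.List.pairwise_lt_pyRange_one 900 1000).filter _
    rw [min?_id_eq_head? _ hp]
    rfl
  | nil =>
    have : ((PySem.List.pyRange 900 1000 1).filter (fun s => !(used.contains s))).head? = none := by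
      rw [hf]; rfl
    rw [List.head?_filter] at this
    rw [this]
    simp only [List.isEmpty_nil, if_true]
    rw [min?_id_eq_head? _ ((PySem.List.pairwise_lt_pyRange_one 1 900).filter _),
      List.head?_filter]
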